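-- pv_equiv track=rewrite | github.com/kaor4bp/trust-evidence-protocol | plugins/trust-evidence-protocol/tep_runtime/hypotheses.py | reopen_hypothesis_entry
-- ===== SOURCE A (Python) =====
-- def reopen_hypothesis_entry(
--     entries: list[dict],
--     claim_ref: str,
--     timestamp: str,
--     note: str | None,
-- ) -> tuple[list[dict], str]:
--     updated_entries: list[dict] = []
--     reopened = False
--     active_exists = False
--     for entry in entries:
--         next_entry = dict(entry)
--         if str(next_entry.get("claim_ref", "")).strip() != claim_ref:
--             updated_entries.append(next_entry)
--             continue
--         if str(next_entry.get("status", "")).strip() == "active":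
--             active_exists = True
--             updated_entries.append(next_entry)
--             continue
--         if not reopened:
--             next_entry["status"] = "active"
--             next_entry["updated_at"] = timestamp
--             if note:
--                 next_entry["note"] = note.strip()
--             reopened = True
--         updated_entries.append(next_entry)
--     if active_exists:
--         return updated_entries, "active-exists"
--     if not reopened:
--         return updated_entries, "missing"
--     return updated_entries, "reopened"
-- ===== SOURCE B (Python) =====
-- def reopen_hypothesis_entry(
--     entries: list[dict],
--     claim_ref: str,
--     timestamp: str,
--     note: str | None,
-- ) -> tuple[list[dict], str]:
--     def matches(e):
--         return str(e.get("claim_ref", "")).strip() == claim_ref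
--
--     def is_active(e):
--         return str(e.get("status", "")).strip() == "active"
--
--     active_exists = any(matches(e) and is_active(e) for e in entries)
--     reopen_idx = next(
--         (i for i, e in enumerate(entries) if matches(e) and not is_active(e)),
--         None,
--     )
--     updated_entries = [dict(e) for e in entries]
--     if reopen_idx is not None:
--         target = updated_entries[reopen_idx]
--         target["status"] = "active"
--         target["updated_at"] = timestamp
--         if note:
--             target["note"] = note.strip()
--     if active_exists:
--         return updated_entries, "active-exists"
--     if reopen_idx is None:
--         return updated_entries, "missing"
--     return updated_entries, "reopened"
-- ===== Notes on version B (the rewrite author's own statement) =====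
-- stated objective: alternative
-- what changed: Replaces A's single stateful loop (flags reopened/active_exists threaded through the pass) by a declarative decomposition: a pre-scan computing active_exists and the index of the first reopenable entry, then a bulk copy with one targeted mutation, then the label chosen from the two summaries.
import Mathlib
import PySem

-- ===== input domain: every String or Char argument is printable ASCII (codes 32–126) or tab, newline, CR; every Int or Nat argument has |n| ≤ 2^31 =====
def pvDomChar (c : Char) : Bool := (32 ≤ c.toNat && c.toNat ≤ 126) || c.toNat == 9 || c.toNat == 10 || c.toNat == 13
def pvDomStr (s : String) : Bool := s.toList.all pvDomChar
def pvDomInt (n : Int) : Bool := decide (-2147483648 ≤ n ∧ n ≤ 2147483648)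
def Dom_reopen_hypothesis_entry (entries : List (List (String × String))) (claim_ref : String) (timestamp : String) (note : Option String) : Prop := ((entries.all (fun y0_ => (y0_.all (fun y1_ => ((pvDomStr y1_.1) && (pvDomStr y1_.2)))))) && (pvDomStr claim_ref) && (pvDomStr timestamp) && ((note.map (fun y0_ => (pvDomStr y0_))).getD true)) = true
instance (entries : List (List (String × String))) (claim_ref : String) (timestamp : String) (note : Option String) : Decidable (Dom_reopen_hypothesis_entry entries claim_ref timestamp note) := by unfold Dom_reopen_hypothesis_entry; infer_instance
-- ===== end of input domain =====

-- B replaces A's single stateful loop (reopened/active_exists flags threaded through one pass) by a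
-- pre-scan for the two summaries (active flag, first reopenable index), a bulk copy with one targeted
-- update, and a label chosen from the summaries — same cost, different decomposition (objective: alternative).

-- ===== PORT A =====
-- A's loop: for each entry, copy it (dict(entry)), branch in A's order, thread (reopened, active_exists).
-- Dicts are PySem.Dict; copies are appended as dicts and turned into item lists at the end.
def pvLoopA (claim_ref timestamp : String) (note : Option String) :
    List (List (String × String)) → Bool → Bool →
      (List (PySem.Dict String String) × Bool × Bool)
  | [], reopened, active_exists => ([], reopened, active_exists)
  | e :: rest, reopened, active_exists =>
    let next_entry := PySem.Dict.ofList e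
    if PySem.Str.strip (next_entry.getD "claim_ref" "") ≠ claim_ref then
      let (l, r, a) := pvLoopA claim_ref timestamp note rest reopened active_exists
      (next_entry :: l, r, a)
    else if PySem.Str.strip (next_entry.getD "status" "") = "active" then
      let (l, r, a) := pvLoopA claim_ref timestamp note rest reopened true
      (next_entry :: l, r, a)
    else if !reopened then
      let d1 := (next_entry.insert "status" "active").insert "updated_at" timestamp
      let d2 := match note with
        | none => d1
        | some s => if s ≠ "" then d1.insert "note" (PySem.Str.strip s) else d1
      let (l, r, a) := pvLoopA claim_ref timestamp note rest true active_exists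
      (d2 :: l, r, a)
    else
      let (l, r, a) := pvLoopA claim_ref timestamp note rest reopened active_exists
      (next_entry :: l, r, a)

def reopen_hypothesis_entry (entries : List (List (String × String))) (claim_ref : String) (timestamp : String) (note : Option String) : (List (List (String × String))) × String :=
  let (updated_entries, reopened, active_exists) :=
    pvLoopA claim_ref timestamp note entries false false
  if active_exists then (updated_entries.map (·.items), "active-exists")
  else if !reopened then (updated_entries.map (·.items), "missing")
  else (updated_entries.map (·.items), "reopened")

-- ===== PORT B =====
def pvMatchesB (claim_ref : String) (e : List (String × String)) : Bool :=
  PySem.Str.strip ((PySem.Dict.ofList e).getD "claim_ref" "") == claim_ref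

def pvIsActiveB (e : List (String × String)) : Bool :=
  PySem.Str.strip ((PySem.Dict.ofList e).getD "status" "") == "active"

-- the in-place mutation of the target copy: status, updated_at, optionally note
def pvReopenB (timestamp : String) (note : Option String) (d : PySem.Dict String String) :
    PySem.Dict String String :=
  let d := (d.insert "status" "active").insert "updated_at" timestamp
  match note with
  | none => d
  | some s => if s ≠ "" then d.insert "note" (PySem.Str.strip s) else d

def reopen_hypothesis_entry_alt (entries : List (List (String × String))) (claim_ref : String) (timestamp : String) (note : Option String) : (List (List (String × String))) × String :=
  let active_exists := entries.any (fun e => pvMatchesB claim_ref e && pvIsActiveB e)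
  let reopen_idx := entries.findIdx? (fun e => pvMatchesB claim_ref e && !pvIsActiveB e)
  let copies := entries.map PySem.Dict.ofList
  let updated_entries :=
    match reopen_idx with
    | none => copies
    | some i => copies.set i (pvReopenB timestamp note (copies.getD i PySem.Dict.empty))
  if active_exists then (updated_entries.map (·.items), "active-exists")
  else
    match reopen_idx with
    | none => (updated_entries.map (·.items), "missing")
    | some _ => (updated_entries.map (·.items), "reopened")

-- ===== PRECONDITION & SPEC =====
def Spec_reopen_hypothesis_entry (entries : List (List (String × String))) (claim_ref : String) (timestamp : String) (note : Option String) (out : (List (List (String × String))) × String) : Prop := out = reopen_hypothesis_entry_alt entries claim_ref timestamp note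
instance (entries : List (List (String × String))) (claim_ref : String) (timestamp : String) (note : Option String) (out : (List (List (String × String))) × String) : Decidable (Spec_reopen_hypothesis_entry entries claim_ref timestamp note out) := by unfold Spec_reopen_hypothesis_entry; infer_instance

-- ===== CLAIM (what is proved, stated in full; the proofs are below) =====
def Claim_equal_reopen_hypothesis_entry : Prop := ∀ (entries : List (List (String × String))) (claim_ref : String) (timestamp : String) (note : Option String), Dom_reopen_hypothesis_entry entries claim_ref timestamp note → Spec_reopen_hypothesis_entry entries claim_ref timestamp note (reopen_hypothesis_entry entries claim_ref timestamp note)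

-- ===== LEMMAS AND PROOFS =====

-- Once A's loop has reopened, every further entry is copied unchanged; only the active flag can still change.
theorem pvLoopA_true (claim_ref timestamp : String) (note : Option String) :
    ∀ (l : List (List (String × String))) (a : Bool),
      pvLoopA claim_ref timestamp note l true a =
        (l.map PySem.Dict.ofList, true,
          a || l.any (fun e => pvMatchesB claim_ref e && pvIsActiveB e)) := by
  intro l
  induction l with
  | nil => intro a; simp [pvLoopA]
  | cons e rest ih =>
    intro a
    by_cases hm : PySem.Str.strip ((PySem.Dict.ofList e).getD "claim_ref" "") = claim_ref
    · by_cases hs : PySem.Str.strip ((PySem.Dict.ofList e).getD "status" "") = "active"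
      · have hmB : pvMatchesB claim_ref e = true := by simp [pvMatchesB, hm]
        have hsB : pvIsActiveB e = true := by simp [pvIsActiveB, hs]
        simp only [pvLoopA, if_neg (not_not_intro hm), if_pos hs, ih true]
        simp [hmB, hsB]
      · have hmB : pvMatchesB claim_ref e = true := by simp [pvMatchesB, hm]
        have hsB : pvIsActiveB e = false := by simp [pvIsActiveB, hs]
        simp only [pvLoopA, if_neg (not_not_intro hm), if_neg hs, Bool.not_true, ih a]
        simp [hmB, hsB]
    · have hmB : pvMatchesB claim_ref e = false := by simp [pvMatchesB, hm]
      simp only [pvLoopA, if_pos hm, ih a]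
      simp [hmB]

-- Before any reopening, A's loop result is B's summaries applied: untouched copies when no entry is
-- reopenable, otherwise the copies with the first reopenable index updated; the reopened flag is
-- exactly "a reopenable index exists" and the active flag is B's any-scan.
theorem pvLoopA_false (claim_ref timestamp : String) (note : Option String) :
    ∀ (l : List (List (String × String))) (a : Bool),
      pvLoopA claim_ref timestamp note l false a =
        (match l.findIdx? (fun e => pvMatchesB claim_ref e && !pvIsActiveB e) with
         | none => l.map PySem.Dict.ofList
         | some i => (l.map PySem.Dict.ofList).set i
             (pvReopenB timestamp note ((l.map PySem.Dict.ofList).getD i PySem.Dict.empty)),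
         (l.findIdx? (fun e => pvMatchesB claim_ref e && !pvIsActiveB e)).isSome,
         a || l.any (fun e => pvMatchesB claim_ref e && pvIsActiveB e)) := by
  intro l
  induction l with
  | nil => intro a; simp [pvLoopA]
  | cons e rest ih =>
    intro a
    by_cases hm : PySem.Str.strip ((PySem.Dict.ofList e).getD "claim_ref" "") = claim_ref
    · by_cases hs : PySem.Str.strip ((PySem.Dict.ofList e).getD "status" "") = "active"
      · -- matching, active: copied; active flag set, reopened stays false
        have hmB : pvMatchesB claim_ref e = true := by simp [pvMatchesB, hm]
        have hsB : pvIsActiveB e = true := by simp [pvIsActiveB, hs]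
        simp only [pvLoopA, if_neg (not_not_intro hm), if_pos hs, ih true]
        cases hfi : rest.findIdx? (fun e => pvMatchesB claim_ref e && !pvIsActiveB e) with
        | none => simp [List.findIdx?_cons, hmB, hsB, hfi]
        | some j => simp [List.findIdx?_cons, hmB, hsB, hfi, List.getD]
      · -- matching, not active, not yet reopened: this entry is the reopened one (index 0)
        have hmB : pvMatchesB claim_ref e = true := by simp [pvMatchesB, hm]
        have hsB : pvIsActiveB e = false := by simp [pvIsActiveB, hs]
        simp only [pvLoopA, if_neg (not_not_intro hm), if_neg hs, Bool.not_false,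
          pvLoopA_true claim_ref timestamp note rest a]
        simp [List.findIdx?_cons, hmB, hsB, pvReopenB, List.getD]
    · -- not matching: copied, flags unchanged
      have hmB : pvMatchesB claim_ref e = false := by simp [pvMatchesB, hm]
      simp only [pvLoopA, if_pos hm, ih a]
      cases hfi : rest.findIdx? (fun e => pvMatchesB claim_ref e && !pvIsActiveB e) with
      | none => simp [List.findIdx?_cons, hmB, hfi]
      | some j => simp [List.findIdx?_cons, hmB, hfi, List.getD]

-- ===== VERDICT (by name: the statement is the Claim_ definition above) =====
theorem reopen_hypothesis_entry_spec : Claim_equal_reopen_hypothesis_entry := by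
  intro entries claim_ref timestamp note _
  unfold Spec_reopen_hypothesis_entry reopen_hypothesis_entry reopen_hypothesis_entry_alt
  simp only [pvLoopA_false claim_ref timestamp note entries false]
  cases hfi : entries.findIdx? (fun e => pvMatchesB claim_ref e && !pvIsActiveB e) with
  | none =>
    cases ha : entries.any (fun e => pvMatchesB claim_ref e && pvIsActiveB e) <;> simp
  | some i =>
    cases ha : entries.any (fun e => pvMatchesB claim_ref e && pvIsActiveB e) <;> simp
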